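-- pv_equiv track=rewrite | github.com/hkad98/problem_solver | sequence_handler.py | sequence_finder
-- ===== SOURCE A (Python) =====
-- from typing import List, TYPE_CHECKING, Tuple
--
-- def list_in(a: List, b: List) -> bool:
--     """
--     Checks if sequence of values from list a are in list b.
--     https://stackoverflow.com/questions/51053402/finding-a-sequence-in-list-using-another-list-in-python
--     :param a: Sequence of values in list.
--     :param b: Destination list.
--     :return: Boolean if sequence is in list.
--     """
--     return any(map(lambda x: b[x:x + len(a)] == a, range(len(b) - len(a) + 1)))
--
-- def sequence_finder(part: List, sequences: List) -> Tuple: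
--     """
--     Tries to find all sequences. Stops at the first one.
--     :param part: List of words/template values got by method get_template.
--     :param sequences: Sequence for math operation from file.
--     :return: Number of match cases.
--     """
--     ret = ''
--     found = False
--     for s in sequences:
--         seq = s[0].split(' ')
--         expr = s[1]
--         if '_' in seq:
--             idx = seq.index('_')
--             l1 = seq[:idx]
--             l2 = seq[idx + 1:]
--             if list_in(l1, part) and list_in(l2, part):
--                 ret = expr
--                 found = True
--                 break
--         else:
--             if list_in(seq, part):
--                 ret = expr
--                 found = True
--                 break
--     return found, ret
-- ===== SOURCE B (Python) =====
-- def sequence_finder(part, sequences):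
--     # Parse each sequence once into the list of word-tuples it needs.
--     needed = []
--     for s in sequences:
--         words = s[0].split(' ')
--         if '_' in words:
--             k = words.index('_')
--             group = [tuple(words[:k]), tuple(words[k + 1:])]
--         else:
--             group = [tuple(words)]
--         needed.append((group, s[1]))
--     # Index: every contiguous window of part whose length is actually needed.
--     lengths = {len(t) for group, _ in needed for t in group}
--     windows = {tuple(part[i:i + L]) for L in lengths for i in range(len(part) - L + 1)}
--     for group, expr in needed:
--         if all(t in windows for t in group):
--             return True, expr
--     return False, ''
-- ===== Notes on version B (the rewrite author's own statement) =====
-- stated objective: faster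
-- what changed: B parses all sequences once, builds a precomputed hash set of the contiguous windows of part (only for the lengths actually needed), and replaces A's per-sequence naive sliding slice-compare (list_in) by a set-membership test, removing the inner scan over part.
import Mathlib
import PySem

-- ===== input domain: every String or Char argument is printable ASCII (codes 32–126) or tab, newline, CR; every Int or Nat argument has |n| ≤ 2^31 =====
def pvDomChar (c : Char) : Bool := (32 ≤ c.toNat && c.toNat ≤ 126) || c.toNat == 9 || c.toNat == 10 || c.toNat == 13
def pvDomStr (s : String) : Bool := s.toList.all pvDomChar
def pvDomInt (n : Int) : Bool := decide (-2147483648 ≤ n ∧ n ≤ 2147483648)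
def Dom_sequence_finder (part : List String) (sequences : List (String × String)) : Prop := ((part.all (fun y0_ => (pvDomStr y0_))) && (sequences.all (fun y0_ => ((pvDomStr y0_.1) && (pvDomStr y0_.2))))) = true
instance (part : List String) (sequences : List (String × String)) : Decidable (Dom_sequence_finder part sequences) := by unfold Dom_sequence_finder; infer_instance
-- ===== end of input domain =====

-- B replaces A's per-sequence naive sliding scan by a precomputed set of contiguous windows of part; alternative structure.
-- ===== PORT A =====
def listIn (a b : List String) : Bool :=
  (PySem.List.pyRange 0 ((b.length : Int) - (a.length : Int) + 1) 1).any
    (fun x => PySem.List.slice b (some x) (some (x + (a.length : Int))) == a)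

def seqLoopA (part : List String) : List (String × String) → Bool × String
  | [] => (false, "")
  | s :: rest =>
    let seq := (PySem.Str.split? s.1 " ").getD []  -- sep " " ≠ "": split? is always some
    if "_" ∈ seq then
      -- '_' ∈ seq guarantees index? = some, so the getD default is never used
      let idx : Nat := (PySem.List.index? seq "_").getD 0
      let l1 := PySem.List.slice seq none (some (idx : Int))
      let l2 := PySem.List.slice seq (some ((idx : Int) + 1)) none
      if listIn l1 part && listIn l2 part then (true, s.2) else seqLoopA part rest
    else
      if listIn seq part then (true, s.2) else seqLoopA part rest

def sequence_finder (part : List String) (sequences : List (String × String)) : Bool × String :=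
  seqLoopA part sequences

-- ===== PORT B =====
def parseSeq (s : String × String) : List (List String) × String :=
  let words := (PySem.Str.split? s.1 " ").getD []  -- sep " " ≠ "": split? is always some
  if "_" ∈ words then
    let k : Nat := (PySem.List.index? words "_").getD 0
    ([PySem.List.slice words none (some (k : Int)),
      PySem.List.slice words (some ((k : Int) + 1)) none], s.2)
  else
    ([words], s.2)

def windowsOf (part : List String) (lengths : PySem.Set Int) : PySem.Set (List String) :=
  PySem.Set.ofList (lengths.flatMap
    (fun L => (PySem.List.pyRange 0 ((part.length : Int) - L + 1) 1).map
      (fun i => PySem.List.slice part (some i) (some (i + L)))))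

def seqLoopB (windows : PySem.Set (List String)) : List (List (List String) × String) → Bool × String
  | [] => (false, "")
  | (g, e) :: rest =>
    if g.all (fun t => PySem.Set.contains windows t) then (true, e) else seqLoopB windows rest

def sequence_finder_alt (part : List String) (sequences : List (String × String)) : Bool × String :=
  let needed := sequences.map parseSeq
  let lengths : PySem.Set Int :=
    PySem.Set.ofList (needed.flatMap (fun g => g.1.map (fun t => (t.length : Int))))
  let windows := windowsOf part lengths
  seqLoopB windows needed

-- ===== PRECONDITION & SPEC =====
def Spec_sequence_finder (part : List String) (sequences : List (String × String)) (out : Bool × String) : Prop := out = sequence_finder_alt part sequences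
instance (part : List String) (sequences : List (String × String)) (out : Bool × String) : Decidable (Spec_sequence_finder part sequences out) := by unfold Spec_sequence_finder; infer_instance

-- ===== CLAIM (what is proved, stated in full; the proofs are below) =====
def Claim_equal_sequence_finder : Prop := ∀ (part : List String) (sequences : List (String × String)), Dom_sequence_finder part sequences → Spec_sequence_finder part sequences (sequence_finder part sequences)

-- ===== LEMMAS AND PROOFS =====
lemma take_drop_infix {α} (b : List α) (j n : Nat) : (b.drop j).take n <:+: b :=
  ((b.drop j).take_prefix n).isInfix.trans (b.drop_suffix j).isInfix

lemma infix_slice (a b : List String) (h : a <:+: b) :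
    ∃ x : Int, 0 ≤ x ∧ x < (b.length : Int) - (a.length : Int) + 1 ∧
      PySem.List.slice b (some x) (some (x + (a.length : Int))) = a := by
  obtain ⟨s, t, rfl⟩ := h
  refine ⟨(s.length : Int), by positivity, by simp [List.length_append]; omega, ?_⟩
  rw [PySem.List.slice_natCast_add]
  simp

lemma listIn_iff (a b : List String) : listIn a b = true ↔ a <:+: b := by
  unfold listIn
  rw [List.any_eq_true]
  constructor
  · rintro ⟨x, hx, hs⟩
    rw [PySem.List.mem_pyRange_one] at hx
    obtain ⟨hx0, -⟩ := hx
    have hb : x = ((x.toNat : Nat) : Int) := by omega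
    rw [hb, PySem.List.slice_natCast_add] at hs
    have := beq_iff_eq.mp hs
    rw [← this]
    exact take_drop_infix b x.toNat a.length
  · intro h
    obtain ⟨x, hx0, hxlt, hs⟩ := infix_slice a b h
    exact ⟨x, PySem.List.mem_pyRange_one.mpr ⟨hx0, hxlt⟩, beq_iff_eq.mpr hs⟩

lemma mem_windows_iff (part : List String) (ll : List Int)
    (hpos : ∀ L ∈ ll, 0 ≤ L) (a : List String) (ha : (a.length : Int) ∈ ll) :
    PySem.Set.contains (windowsOf part (PySem.Set.ofList ll)) a = true ↔ a <:+: part := by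
  unfold windowsOf
  rw [PySem.Set.contains_iff, PySem.Set.mem_ofList, List.mem_flatMap]
  constructor
  · rintro ⟨L, hL, hmem⟩
    rw [List.mem_map] at hmem
    obtain ⟨i, hi, hs⟩ := hmem
    rw [PySem.List.mem_pyRange_one] at hi
    have hL0 : 0 ≤ L := hpos L (PySem.Set.mem_ofList ll L |>.mp hL)
    have h1 : i = ((i.toNat : Nat) : Int) := by omega
    have h2 : L = ((L.toNat : Nat) : Int) := by omega
    rw [h1, h2, PySem.List.slice_natCast_add] at hs
    rw [← hs]
    exact take_drop_infix part i.toNat L.toNat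
  · intro h
    obtain ⟨x, hx0, hxlt, hs⟩ := infix_slice a part h
    refine ⟨(a.length : Int), (PySem.Set.mem_ofList ll _).mpr ha, ?_⟩
    rw [List.mem_map]
    exact ⟨x, PySem.List.mem_pyRange_one.mpr ⟨hx0, hxlt⟩, hs⟩

lemma contains_eq_listIn (part : List String) (ll : List Int) (hpos : ∀ L ∈ ll, 0 ≤ L)
    (t : List String) (ht : (t.length : Int) ∈ ll) :
    PySem.Set.contains (windowsOf part (PySem.Set.ofList ll)) t = listIn t part := by
  rw [Bool.eq_iff_iff, mem_windows_iff part ll hpos t ht, listIn_iff]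

lemma loop_eq (part : List String) (ll : List Int) (hpos : ∀ L ∈ ll, 0 ≤ L)
    (rest : List (String × String))
    (hmem : ∀ p ∈ rest, ∀ t ∈ (parseSeq p).1, (t.length : Int) ∈ ll) :
    seqLoopA part rest = seqLoopB (windowsOf part (PySem.Set.ofList ll)) (rest.map parseSeq) := by
  induction rest with
  | nil => rfl
  | cons p rest ih =>
    have hp := hmem p (List.mem_cons_self)
    have ihh := ih (fun q hq => hmem q (List.mem_cons_of_mem _ hq))
    simp only [List.map_cons, seqLoopA, seqLoopB, parseSeq] at hp ⊢
    by_cases hu : "_" ∈ (PySem.Str.split? p.1 " ").getD []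
    · simp only [if_pos hu] at hp ⊢
      simp only [List.all_cons, List.all_nil, Bool.and_true] at hp ⊢
      rw [contains_eq_listIn part ll hpos _ (hp _ (by simp)),
          contains_eq_listIn part ll hpos _ (hp _ (by simp))]
      split <;> simp_all
    · simp only [if_neg hu] at hp ⊢
      simp only [List.all_cons, List.all_nil, Bool.and_true] at hp ⊢
      rw [contains_eq_listIn part ll hpos _ (hp _ (by simp))]
      split <;> simp_all

-- ===== VERDICT (by name: the statement is the Claim_ definition above) =====
theorem sequence_finder_spec : Claim_equal_sequence_finder := by
  intro part sequences _
  unfold Spec_sequence_finder sequence_finder sequence_finder_alt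
  apply loop_eq
  · intro L hL
    simp only [List.mem_flatMap, List.mem_map] at hL
    obtain ⟨g, -, t, -, rfl⟩ := hL
    positivity
  · intro p hp t ht
    simp only [List.mem_flatMap, List.mem_map]
    exact ⟨parseSeq p, ⟨p, hp, rfl⟩, t, ht, rfl⟩
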